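/-
  A LONG STRAIGHT-LINE REGION through the walker: 121 instructions without a cut point, a branch or a hand — ONE `u_walk`.

  The image has no such region outside its SSE loops, so this one is synthetic: twelve times
      add rax, 0x10 ; mov [rsp-8], rax ; mov rcx, [rsp-8] ; lea rdx, [rcx+0x20] ; shl rdx, 2 ; mov [rsp-0x10], rdx ;
      cmp rcx, rdx ; mov rbx, [rsp-0x10] ; and rbx, 0xff ; xor rsi, rbx
  and a `ret`: 24 stores into two stack slots (the memory term grows to 24 layers: the slots alternate), 24 loads that are read
  back through them, a value (`rsi`) that accumulates, flags written by 60 instructions (one layer at the end).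

  Measured (12 cores of the shared host, 2026-09-20): 22.6 s wall for the file, of which about 4 s are imports and `#code_sweep`:
  0.15 s per instruction — `u_body` 107 ms, the freeze 4.8 ms (maximum 127 ms), the kernel 10.6 ms. The context at the end:
  8 hypotheses about the state, 2 range facts; `w_mem` 24 layers.
-/
import UserX.Loop
import UserX.Call
import UserX.FrameTac
namespace X86.User.WalkLongTest
open X86 X86.User

#code_bytes code_synth
  "4883c01048894424f8488b4c24f8488d512048c1e20248895424f04839d1488b"
  "5c24f04881e3ff0000004831de4883c01048894424f8488b4c24f8488d512048"
  "c1e20248895424f04839d1488b5c24f04881e3ff0000004831de4883c0104889"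
  "4424f8488b4c24f8488d512048c1e20248895424f04839d1488b5c24f04881e3"
  "ff0000004831de4883c01048894424f8488b4c24f8488d512048c1e202488954"
  "24f04839d1488b5c24f04881e3ff0000004831de4883c01048894424f8488b4c"
  "24f8488d512048c1e20248895424f04839d1488b5c24f04881e3ff0000004831"
  "de4883c01048894424f8488b4c24f8488d512048c1e20248895424f04839d148"
  "8b5c24f04881e3ff0000004831de4883c01048894424f8488b4c24f8488d5120"
  "48c1e20248895424f04839d1488b5c24f04881e3ff0000004831de4883c01048"
  "894424f8488b4c24f8488d512048c1e20248895424f04839d1488b5c24f04881"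
  "e3ff0000004831de4883c01048894424f8488b4c24f8488d512048c1e2024889"
  "5424f04839d1488b5c24f04881e3ff0000004831de4883c01048894424f8488b"
  "4c24f8488d512048c1e20248895424f04839d1488b5c24f04881e3ff00000048"
  "31de4883c01048894424f8488b4c24f8488d512048c1e20248895424f04839d1"
  "488b5c24f04881e3ff0000004831de4883c01048894424f8488b4c24f8488d51"
  "2048c1e20248895424f04839d1488b5c24f04881e3ff0000004831dec3"
#code_sweep code_synth

variable {L : Layout} {μ : Microarch} {u : State}

set_option linter.unusedSimpArgs false
set_option linter.unusedVariables false
set_option maxRecDepth 8000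
set_option maxHeartbeats 8000000

/-- The whole region, to the state after the `ret`: where RIP and RSP are, what RAX holds, which registers changed, and
that only the two slots below the stack pointer were written. -/
theorem synth_walk (a b sp ret : Word) (hμ : μ.vendor = .intel)
    (hcode : HasCodeNat L u 0x104000 code_synth.nat 541)
    (hrip : u.rip = 0x104000) (hrax : u.reg .rax = a) (hrsi : u.reg .rsi = b) (hrsp : u.reg .rsp = sp)
    (hret : UInt64.ofNat (u.mem.readLE sp 8) = ret) (hretlt : ret < 0x40000000)
    (hstack : L.Has (sp - 16) 24) (hstackLo : 0x120000 ≤ (sp - 16).toNat) :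
    ReachVia L μ (fun v => v.rip ≠ 0x100059) u (fun v => v.rip = ret ∧ v.reg .rsp = sp + 8 ∧ v.reg .rax = a + 192 ∧
      RegsKept [.rax, .rcx, .rdx, .rbx, .rsi, .rsp] u v ∧
      Mem.SameExcept [⟨(sp - 16).toNat, sp.toNat⟩] u.mem v.mem) := by
  u_walk hcode [hμ]
  exact ReachVia.done ⟨w_rip, w_rsp, w_rax, RegsKept.mono_all w_kept (by rfl), by u_same⟩

end X86.User.WalkLongTest
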